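-- pv_equiv track=rewrite | github.com/ayoubc/competitive-programming | online_judges/kattis/shortlex.py | solve
-- ===== SOURCE A (Python) =====
-- def solve(n):
--     tot = 0
--     l = 0
--     while tot + (1 << l) <= n:
--         tot += (1 << l)
--         l += 1
--
--
--     index = n - tot
--     ans = bin(index)[2:]
--     ans = "0" * (l - len(ans)) + ans
--     return ans
-- ===== SOURCE B (Python) =====
-- def solve(n):
--     # shortlex rank n <-> binary representation of n+1 with the leading '1' removed
--     return bin(n + 1)[3:]
-- ===== Notes on version B (the rewrite author's own statement) =====
-- stated objective: simpler
-- what changed: Replaces the level-summing while loop plus manual zero-padding by the closed form bin(n+1)[3:]: the shortlex string of rank n is the binary representation of n+1 with its leading 1 dropped.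
-- intended difference: At n = 0 A returns '0' (an artefact of bin(0)='0b0' surviving the negative-repeat padding) while B returns '', the empty string, which is the correct shortlex string of rank 0. — e.g. on solve(0): A returns "0", B returns ""
-- outside the precondition, e.g. on solve(-2): A returns 'b10', B returns '1'
import Mathlib
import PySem

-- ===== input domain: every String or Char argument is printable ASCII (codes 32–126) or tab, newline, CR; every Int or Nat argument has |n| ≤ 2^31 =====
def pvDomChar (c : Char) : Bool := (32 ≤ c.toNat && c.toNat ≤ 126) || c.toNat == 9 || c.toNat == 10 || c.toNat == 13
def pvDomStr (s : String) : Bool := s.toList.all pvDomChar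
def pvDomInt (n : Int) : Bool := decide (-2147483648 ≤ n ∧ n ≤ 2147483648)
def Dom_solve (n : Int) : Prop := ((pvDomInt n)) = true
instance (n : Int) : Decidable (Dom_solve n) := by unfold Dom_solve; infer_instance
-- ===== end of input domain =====

-- B replaces A's level-summing while loop and manual padding by the closed form bin(n+1)[3:] (simpler,
-- same cost); at n = 0 B returns the intended empty string where A returns "0" (D_ below).

-- ===== PORT A =====
-- binary digits of a Nat, most significant first; natBin 0 = [] (bin(m)[2:] handles 0 separately)
def natBin : Nat → List Char
  | 0 => []
  | m+1 => natBin ((m+1)/2) ++ [if (m+1) % 2 = 1 then '1' else '0']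
decreasing_by exact Nat.div_lt_self (Nat.succ_pos m) (by norm_num)

-- bin(m)[2:]  (for m < 0, Python's bin gives '-0b…', so [2:] keeps the 'b')
def intBinSuffix (m : Int) : List Char :=
  if m < 0 then 'b' :: natBin m.natAbs
  else if m = 0 then ['0'] else natBin m.natAbs

-- the while loop of A over its state (tot, l)
def solveLoop (n tot : Int) (l : Nat) : Int × Nat :=
  if tot + 2^l ≤ n then solveLoop n (tot + 2^l) (l+1) else (tot, l)
termination_by (n - tot).toNat
decreasing_by
  have h2 : (0:Int) < 2^l := pow_pos (by norm_num) l
  omega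

def solve (n : Int) : String :=
  -- index = n - tot; ans = bin(index)[2:]; ans = "0"*(l - len(ans)) + ans
  -- (Python repeats a string max(0, ·) times, hence Int.toNat)
  String.ofList
    (List.replicate
        (Int.toNat (((solveLoop n 0 0).2 : Int) - (intBinSuffix (n - (solveLoop n 0 0).1)).length)) '0'
      ++ intBinSuffix (n - (solveLoop n 0 0).1))

-- ===== PORT B =====
-- bin(m) as a character list
def pyBin (m : Int) : List Char :=
  (if m < 0 then ['-'] else []) ++ '0' :: 'b' :: (if m = 0 then ['0'] else natBin m.natAbs)

-- bin(n + 1)[3:] ; s[3:] with a nonnegative index is exactly drop 3 (clamped at the end)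
def solve_alt (n : Int) : String := String.ofList ((pyBin (n + 1)).drop 3)

-- ===== PRECONDITION & SPEC =====
-- Pre_ excludes negative n, outside the function's domain of shortlex ranks: there A slices Python's
-- negative bin() into accidental strings like 'b10' and B's slice yields other strings; neither is a
-- specified value, so the corner is excluded.
def Pre_solve (n : Int) : Prop := 0 ≤ n
instance (n : Int) : Decidable (Pre_solve n) := by unfold Pre_solve; infer_instance
def pvWitness_solve : Int := (5)

-- At n = 0 A returns "0" (bin(0)='0b0' surviving the negative-repeat padding) while B returns "",
-- the empty string, which is the correct shortlex string of rank 0.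
def D_solve (n : Int) : Prop := n = 0
instance (n : Int) : Decidable (D_solve n) := by unfold D_solve; infer_instance
def Spec_solve (n : Int) (out : String) : Prop := ¬ D_solve n → out = solve_alt n
instance (n : Int) (out : String) : Decidable (Spec_solve n out) := by unfold Spec_solve; infer_instance
def pvDiffWitness_solve : Int := (0)
def pvDiffWitnessOut_solve : String × String := ("0", "")

-- ===== CLAIM (what is proved, stated in full; the proofs are below) =====
def Claim_unchanged_solve : Prop := ∀ (n : Int), Dom_solve n → Pre_solve n → Spec_solve n (solve n)
def Claim_changed_solve : Prop := Dom_solve (pvDiffWitness_solve) ∧ Pre_solve (pvDiffWitness_solve) ∧ D_solve (pvDiffWitness_solve) ∧ solve (pvDiffWitness_solve) = pvDiffWitnessOut_solve.1 ∧ solve_alt (pvDiffWitness_solve) = pvDiffWitnessOut_solve.2 ∧ pvDiffWitnessOut_solve.1 ≠ pvDiffWitnessOut_solve.2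
def Claim_exact_solve : Prop := ∀ (n : Int), Dom_solve n → Pre_solve n → D_solve n → solve n ≠ solve_alt n

-- ===== LEMMAS AND PROOFS =====

theorem natBin_zero : natBin 0 = [] := by rw [natBin]

theorem natBin_one : natBin 1 = ['1'] := by rw [natBin]; norm_num [natBin_zero]

theorem natBin_len_le (l : Nat) : ∀ k, k < 2^l → (natBin k).length ≤ l := by
  induction l with
  | zero => intro k hk; interval_cases k; simp [natBin_zero]
  | succ l ih =>
    intro k hk
    match k with
    | 0 => simp [natBin_zero]
    | m+1 =>
      rw [natBin]
      have h := ih ((m+1)/2) (by omega)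
      simp [List.length_append]
      omega

theorem natBin_pow_add (l : Nat) : ∀ k, k < 2^l →
    natBin (2^l + k) = '1' :: (List.replicate (l - (natBin k).length) '0' ++ natBin k) := by
  induction l with
  | zero => intro k hk; interval_cases k; norm_num [natBin_one, natBin_zero]
  | succ l ih =>
    intro k hk
    have hpos : 0 < 2^(l+1) + k := by positivity
    rw [show 2^(l+1) + k = (2^(l+1) + k - 1) + 1 by omega, natBin]
    rw [show (2^(l+1) + k - 1) + 1 = 2^(l+1) + k by omega]
    have hdiv : (2^(l+1) + k) / 2 = 2^l + k/2 := by omega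
    have hmod : (2^(l+1) + k) % 2 = k % 2 := by omega
    rw [hdiv, hmod, ih (k/2) (by omega)]
    match k with
    | 0 => simp [natBin_zero, List.replicate_succ']
    | m+1 =>
      rw [natBin]
      have hd : (m+1)/2 < 2^l := by omega
      have hlen := natBin_len_le l ((m+1)/2) hd
      have hL : l + 1 - ((natBin ((m+1)/2)).length + 1) = l - (natBin ((m+1)/2)).length := by omega
      simp [List.length_append, hL]

theorem solveLoop_invariant (n : Int) : ∀ tot (l : Nat), tot = 2^l - 1 → tot ≤ n →
    (solveLoop n tot l).1 = 2^(solveLoop n tot l).2 - 1 ∧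
    (solveLoop n tot l).1 ≤ n ∧
    n < (solveLoop n tot l).1 + 2^(solveLoop n tot l).2 := by
  intro tot l
  induction tot, l using solveLoop.induct n with
  | case1 tot l hle ih =>
    intro ht hn
    rw [solveLoop, if_pos hle]
    exact ih (by rw [ht]; ring) hle
  | case2 tot l hle =>
    intro ht hn
    rw [solveLoop, if_neg hle]
    exact ⟨ht, hn, by show n < tot + 2^l; omega⟩

theorem solve_eq_alt_of_pos (n : Int) (hn : 1 ≤ n) : solve n = solve_alt n := by
  obtain ⟨h1, h0, h2⟩ := solveLoop_invariant n 0 0 (by norm_num) (by omega)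
  unfold solve
  set p := solveLoop n 0 0 with hp
  set L := p.2 with hL
  have hpL : (0:Int) < 2^L := pow_pos (by norm_num) L
  set k : Nat := (n - p.1).toNat with hk
  have hindex : n - p.1 = (k : Int) := by omega
  have hq : ((2^L : Nat) : Int) = (2:Int)^L := by push_cast; ring
  have hklt : k < 2^L := by omega
  have hn1 : (n + 1).natAbs = 2^L + k := by omega
  -- B's side
  have hB : solve_alt n = String.ofList (List.replicate (L - (natBin k).length) '0' ++ natBin k) := by
    unfold solve_alt pyBin
    rw [if_neg (by omega : ¬ (n + 1 < 0)), if_neg (by omega : ¬ (n + 1 = 0)), hn1,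
       natBin_pow_add L k hklt]
    simp
  rw [hB]
  -- A's side
  by_cases hk0 : k = 0
  · -- index = 0 : ans = "0", and L ≥ 1 since n = 2^L - 1 ≥ 1
    have hL1 : 1 ≤ L := by
      rcases Nat.eq_zero_or_pos L with h | h
      · exfalso; rw [h] at h1; norm_num at h1; omega
      · exact h
    have hA : intBinSuffix (n - p.1) = ['0'] := by
      unfold intBinSuffix
      rw [if_neg (by omega), if_pos (by omega : n - p.1 = 0)]
    rw [hA, hk0]
    simp only [natBin_zero, List.length_cons, List.length_nil, List.append_nil, Nat.sub_zero]
    rw [show Int.toNat ((L:Int) - (1:Nat)) = L - 1 by omega, ← List.replicate_succ',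
       show L - 1 + 1 = L by omega]
  · -- index ≥ 1 : ans = natBin k, of length ≤ L
    have hA : intBinSuffix (n - p.1) = natBin k := by
      unfold intBinSuffix
      rw [hindex, if_neg (by omega), if_neg (by exact_mod_cast hk0)]
      simp
    rw [hA]
    have hlen := natBin_len_le L k hklt
    rw [show Int.toNat ((L:Int) - ((natBin k).length:Nat)) = L - (natBin k).length by omega]

theorem solve_at_zero : solve 0 = "0" ∧ solve_alt 0 = "" := by
  constructor
  · unfold solve
    rw [show solveLoop 0 0 0 = (0, 0) by rw [solveLoop]; norm_num]
    norm_num [intBinSuffix]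
  · unfold solve_alt pyBin
    norm_num [natBin_one]

-- ===== VERDICT (by name: the statement is the Claim_ definition above) =====
theorem solve_spec : Claim_unchanged_solve := by
  intro n _ hpre hnd
  refine solve_eq_alt_of_pos n ?_
  rcases lt_or_eq_of_le hpre with h | h
  · omega
  · exact absurd h.symm hnd

theorem solve_changed : Claim_changed_solve := by
  unfold Claim_changed_solve
  exact ⟨by decide, by decide, by decide, solve_at_zero.1, solve_at_zero.2, by decide⟩

theorem solve_tight : Claim_exact_solve := by
  intro n _ _ hd
  rw [show n = 0 from hd, solve_at_zero.1, solve_at_zero.2]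
  decide
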